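-- pv_equiv track=rewrite | github.com/olabusayo/ncw_training | num_to_alp_decoder.py | get_all_possible_decodings
-- ===== SOURCE A (Python) =====
-- def get_all_possible_decodings(enc):
--     decoded = []
--     final = {}
--     for index in range(len(enc)):
--         ind = index
--         while True:
--             st, ind = find_substr(enc, ind)
--             decoded.append(st)
--             if ind >= len(enc):
--                 final[f"{','.join(str(i) for i in decoded)}"] = 1
--                 decoded = [enc[i] for i in range(index+1)]
--                 break
--     return final
--
-- def find_substr(substr, ind):
--         if ind+1 < len(substr) and check_condition(substr[ind: ind+2]):
--                 return substr[ind: ind+2], ind+2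
--         else:
--             return substr[ind], ind+1
--
-- def check_condition(substr):
--     if substr:
--         return 1 <= int(substr) <= 26
-- ===== SOURCE B (Python) =====
-- def get_all_possible_decodings(enc):
--     n = len(enc)
--     # suf[0] is the greedy token list for enc[j:] once position j has been processed (right-to-left)
--     suf = [[]]
--     for j in reversed(range(n)):
--         if j + 1 < n and 1 <= int(enc[j:j+2]) <= 26:
--             suf.insert(0, [enc[j:j+2]] + suf[1])
--         else:
--             suf.insert(0, [enc[j]] + suf[0])
--     final = {}
--     for i in range(n):
--         final[','.join([enc[k] for k in range(i)] + suf[i])] = 1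
--     return final
-- ===== Notes on version B (the rewrite author's own statement) =====
-- stated objective: alternative
-- what changed: B precomputes one right-to-left table of greedy suffix decodings and assembles each dict key as prefix characters plus the stored suffix, instead of A's stateful re-walking of the greedy parse from every start index with a mutated-and-reset token accumulator.
import Mathlib
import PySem

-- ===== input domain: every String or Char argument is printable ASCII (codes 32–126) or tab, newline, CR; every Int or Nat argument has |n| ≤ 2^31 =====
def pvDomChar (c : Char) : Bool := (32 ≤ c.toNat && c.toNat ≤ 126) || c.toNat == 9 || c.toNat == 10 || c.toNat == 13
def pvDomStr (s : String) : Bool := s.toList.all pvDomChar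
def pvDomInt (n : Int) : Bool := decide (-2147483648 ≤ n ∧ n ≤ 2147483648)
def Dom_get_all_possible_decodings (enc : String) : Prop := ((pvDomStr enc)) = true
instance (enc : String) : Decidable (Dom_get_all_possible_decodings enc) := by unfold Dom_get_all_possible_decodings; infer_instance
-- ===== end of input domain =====

-- B replaces A's stateful re-walking of the greedy parse from every start index by one
-- right-to-left suffix-decoding table plus key assembly (alternative decomposition, same cost).


-- ===== PORT A =====
-- check_condition(substr); where Python's int() raises ValueError the port returns false (those inputs are outside Pre_)
def pvCheckCondition (s : List Char) : Bool :=
  if s.isEmpty then false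
  else match PySem.Int.ofChars? s with
    | some v => decide (1 ≤ v ∧ v ≤ 26)
    | none => false

-- find_substr(substr, ind)
def pvFindSubstr (cs : List Char) (ind : Nat) : List Char × Nat :=
  if decide (ind + 1 < cs.length) && pvCheckCondition (PySem.List.slice cs (some (ind : Int)) (some ((ind : Int) + 2)))
  then (PySem.List.slice cs (some (ind : Int)) (some ((ind : Int) + 2)), ind + 2)
  else ([cs.getD ind ' '], ind + 1)

theorem pvFindSubstr_snd_gt (cs : List Char) (ind : Nat) : ind < (pvFindSubstr cs ind).2 := by
  unfold pvFindSubstr; split <;> simp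

-- the 'while True' loop: accumulate tokens into decoded until ind >= len(enc)
def pvWalkA (cs : List Char) (decoded : List (List Char)) (ind : Nat) : List (List Char) :=
  if cs.length ≤ (pvFindSubstr cs ind).2 then decoded ++ [(pvFindSubstr cs ind).1]
  else pvWalkA cs (decoded ++ [(pvFindSubstr cs ind).1]) (pvFindSubstr cs ind).2
termination_by cs.length - ind
decreasing_by
  have hg := pvFindSubstr_snd_gt cs ind
  simp at *; omega

def get_all_possible_decodings (enc : String) : List (String × Int) :=
  let cs := enc.toList
  let st := (List.range cs.length).foldl
    (fun (st : List (List Char) × PySem.Dict String Int) index =>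
      let decoded := pvWalkA cs st.1 index
      (((List.range (index + 1)).map (fun i => [cs.getD i ' '])),
        st.2.insert (String.ofList (PySem.Chars.join [','] decoded)) 1))
    ([], PySem.Dict.empty)
  st.2.items

-- ===== PORT B =====
-- the inline '1 <= int(s) <= 26' test; false where int() raises (outside Pre_)
def pvCondInt (s : List Char) : Bool :=
  match PySem.Int.ofChars? s with
  | some v => decide (1 ≤ v ∧ v ≤ 26)
  | none => false

def get_all_possible_decodings_alt (enc : String) : List (String × Int) :=
  let cs := enc.toList
  let n := cs.length
  -- for j in reversed(range(n)): prepend the suffix decoding at j, reading suf[0]/suf[1]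
  let suf := (List.range n).reverse.foldl
    (fun (suf : List (List (List Char))) j =>
      if decide (j + 1 < n) && pvCondInt (PySem.List.slice cs (some (j : Int)) (some ((j : Int) + 2)))
      then (PySem.List.slice cs (some (j : Int)) (some ((j : Int) + 2)) :: suf.getD 1 []) :: suf
      else ([cs.getD j ' '] :: suf.getD 0 []) :: suf)
    [[]]
  let final := (List.range n).foldl
    (fun (d : PySem.Dict String Int) i =>
      d.insert (String.ofList (PySem.Chars.join [',']
        ((List.range i).map (fun k => [cs.getD k ' ']) ++ suf.getD i []))) 1)
    PySem.Dict.empty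
  final.items

-- ===== PRECONDITION & SPEC =====
-- Pre_ excludes exactly the inputs where Python's int() raises ValueError: some two-character
-- window enc[j:j+2] that the scan reaches fails to parse as an int.
def Pre_get_all_possible_decodings (enc : String) : Prop :=
  ∀ j < enc.toList.length - 1,
    (PySem.Int.ofChars? (PySem.List.slice enc.toList (some (j : Int)) (some ((j : Int) + 2)))).isSome = true
instance (enc : String) : Decidable (Pre_get_all_possible_decodings enc) := by unfold Pre_get_all_possible_decodings; infer_instance
def pvWitness_get_all_possible_decodings : String := "123"

def Spec_get_all_possible_decodings (enc : String) (out : List (String × Int)) : Prop := out = get_all_possible_decodings_alt enc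
instance (enc : String) (out : List (String × Int)) : Decidable (Spec_get_all_possible_decodings enc out) := by unfold Spec_get_all_possible_decodings; infer_instance

-- ===== CLAIM (what is proved, stated in full; the proofs are below) =====
def Claim_equal_get_all_possible_decodings : Prop := ∀ (enc : String), Dom_get_all_possible_decodings enc → Pre_get_all_possible_decodings enc → Spec_get_all_possible_decodings enc (get_all_possible_decodings enc)

-- ===== LEMMAS AND PROOFS =====

-- the greedy suffix decoding of enc[j:], the common mathematical core of both ports
def pvSfx (cs : List Char) (j : Nat) : List (List Char) :=
  if h : j < cs.length then
    if decide (j + 1 < cs.length) && pvCheckCondition (PySem.List.slice cs (some (j : Int)) (some ((j : Int) + 2)))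
    then PySem.List.slice cs (some (j : Int)) (some ((j : Int) + 2)) :: pvSfx cs (j + 2)
    else [cs.getD j ' '] :: pvSfx cs (j + 1)
  else []
termination_by cs.length - j

def pvKey (cs : List Char) (i : Nat) : String :=
  String.ofList (PySem.Chars.join [','] ((List.range i).map (fun k => [cs.getD k ' ']) ++ pvSfx cs i))

def pvClean (cs : List Char) (m : Nat) : PySem.Dict String Int :=
  (List.range m).foldl (fun d i => d.insert (pvKey cs i) 1) PySem.Dict.empty

theorem pvSliceTwo (cs : List Char) (j : Nat) :
    PySem.List.slice cs (some (j : Int)) (some ((j : Int) + 2)) = (cs.drop j).take 2 := by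
  have := PySem.List.slice_natCast_add cs j 2
  simpa using this

theorem pvCond_eq (cs : List Char) (j : Nat) (h : j + 1 < cs.length) :
    pvCheckCondition (PySem.List.slice cs (some (j : Int)) (some ((j : Int) + 2)))
      = pvCondInt (PySem.List.slice cs (some (j : Int)) (some ((j : Int) + 2))) := by
  rw [pvSliceTwo]
  have hlen : ((cs.drop j).take 2).length = 2 := by
    simp; omega
  have hE : ((cs.drop j).take 2).isEmpty = false := by
    rw [List.isEmpty_eq_false_iff_exists_mem]
    rcases List.exists_mem_of_length_pos (by omega : 0 < ((cs.drop j).take 2).length) with ⟨x, hx⟩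
    exact ⟨x, hx⟩
  unfold pvCheckCondition pvCondInt
  rw [hE]
  simp

theorem pvWalkA_eq_sfx (cs : List Char) :
    ∀ k ind (d : List (List Char)), cs.length - ind ≤ k → ind < cs.length →
      pvWalkA cs d ind = d ++ pvSfx cs ind := by
  intro k
  induction k with
  | zero => intro ind d hk hind; omega
  | succ k ih =>
    intro ind d hk hind
    rw [pvWalkA, pvSfx, dif_pos hind]
    by_cases hc : (decide (ind + 1 < cs.length) && pvCheckCondition (PySem.List.slice cs (some (ind : Int)) (some ((ind : Int) + 2)))) = true
    · rw [pvFindSubstr, if_pos hc, if_pos hc]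
      by_cases hend : cs.length ≤ ind + 2
      · rw [if_pos hend, pvSfx, dif_neg (by omega)]
      · rw [if_neg hend, ih (ind + 2) _ (by omega) (by omega)]
        simp
    · rw [pvFindSubstr, if_neg hc, if_neg hc]
      by_cases hend : cs.length ≤ ind + 1
      · rw [if_pos hend, pvSfx, dif_neg (by omega)]
      · rw [if_neg hend, ih (ind + 1) _ (by omega) (by omega)]
        simp

-- B's table fold builds exactly the list of suffix decodings
theorem pvTable (cs : List Char) :
    (List.range cs.length).reverse.foldl
      (fun (suf : List (List (List Char))) j =>
        if decide (j + 1 < cs.length) && pvCondInt (PySem.List.slice cs (some (j : Int)) (some ((j : Int) + 2)))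
        then (PySem.List.slice cs (some (j : Int)) (some ((j : Int) + 2)) :: suf.getD 1 []) :: suf
        else ([cs.getD j ' '] :: suf.getD 0 []) :: suf)
      [[]]
    = (List.range (cs.length + 1)).map (fun k => pvSfx cs k) := by
  have H : ∀ j, j ≤ cs.length →
      (List.range j).reverse.foldl
        (fun (suf : List (List (List Char))) j =>
          if decide (j + 1 < cs.length) && pvCondInt (PySem.List.slice cs (some (j : Int)) (some ((j : Int) + 2)))
          then (PySem.List.slice cs (some (j : Int)) (some ((j : Int) + 2)) :: suf.getD 1 []) :: suf
          else ([cs.getD j ' '] :: suf.getD 0 []) :: suf)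
        ((List.range (cs.length + 1 - j)).map (fun k => pvSfx cs (j + k)))
      = (List.range (cs.length + 1)).map (fun k => pvSfx cs k) := by
    intro j
    induction j with
    | zero => intro _; simp
    | succ j ih =>
      intro hj
      rw [List.range_succ, List.reverse_append, List.reverse_singleton, List.singleton_append,
        List.foldl_cons]
      have hstep :
          (if decide (j + 1 < cs.length) && pvCondInt (PySem.List.slice cs (some (j : Int)) (some ((j : Int) + 2)))
           then (PySem.List.slice cs (some (j : Int)) (some ((j : Int) + 2)) ::
                  ((List.range (cs.length + 1 - (j + 1))).map (fun k => pvSfx cs (j + 1 + k))).getD 1 []) ::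
                  (List.range (cs.length + 1 - (j + 1))).map (fun k => pvSfx cs (j + 1 + k))
           else ([cs.getD j ' '] ::
                  ((List.range (cs.length + 1 - (j + 1))).map (fun k => pvSfx cs (j + 1 + k))).getD 0 []) ::
                  (List.range (cs.length + 1 - (j + 1))).map (fun k => pvSfx cs (j + 1 + k)))
          = (List.range (cs.length + 1 - j)).map (fun k => pvSfx cs (j + k)) := by
        have hlen1 : cs.length + 1 - (j + 1) = cs.length - j := by omega
        have hrhs : (List.range (cs.length + 1 - j)).map (fun k => pvSfx cs (j + k))
            = pvSfx cs j :: (List.range (cs.length - j)).map (fun k => pvSfx cs (j + 1 + k)) := by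
          have h1 : cs.length + 1 - j = (cs.length - j) + 1 := by omega
          rw [h1, List.range_succ_eq_map, List.map_cons, List.map_map]
          congr 1
          apply List.map_congr_left
          intro k _
          simp only [Function.comp_apply]
          congr 1
          omega
        rw [hrhs, hlen1]
        by_cases h1' : j + 1 < cs.length
        · by_cases h2 : pvCondInt (PySem.List.slice cs (some (j : Int)) (some ((j : Int) + 2))) = true
          · rw [if_pos (by simp [h1', h2])]
            rw [PySem.List.getD_map_range _ (cs.length - j) 1 [] (by omega)]
            conv_rhs => rw [pvSfx]
            rw [dif_pos (by omega : j < cs.length),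
              if_pos (by rw [pvCond_eq cs j h1']; simp [h1', h2])]
          · rw [if_neg (by simp [h2])]
            rw [PySem.List.getD_map_range _ (cs.length - j) 0 [] (by omega)]
            conv_rhs => rw [pvSfx]
            rw [dif_pos (by omega : j < cs.length),
              if_neg (by rw [pvCond_eq cs j h1']; simp [h2])]
        · rw [if_neg (by simp [h1'])]
          rw [PySem.List.getD_map_range _ (cs.length - j) 0 [] (by omega)]
          conv_rhs => rw [pvSfx]
          rw [dif_pos (by omega : j < cs.length), if_neg (by simp [h1'])]
      rw [hstep]
      exact ih (by omega)
  have hinit : ((List.range (cs.length + 1 - cs.length)).map (fun k => pvSfx cs (cs.length + k))) = [[]] := by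
    have h1 : cs.length + 1 - cs.length = 1 := by omega
    rw [h1]
    simp [List.range_succ]
    rw [pvSfx]
    simp
  rw [← hinit]
  exact H cs.length (le_refl _)

-- A's outer fold, characterised
theorem pvAFold (cs : List Char) (m : Nat) (hm : m ≤ cs.length) :
    (List.range m).foldl
      (fun (st : List (List Char) × PySem.Dict String Int) index =>
        (((List.range (index + 1)).map (fun i => [cs.getD i ' '])),
          st.2.insert (String.ofList (PySem.Chars.join [','] (pvWalkA cs st.1 index))) 1))
      ([], PySem.Dict.empty)
    = ((List.range m).map (fun i => [cs.getD i ' ']), pvClean cs m) := by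
  induction m with
  | zero => simp [pvClean]
  | succ m ih =>
    rw [List.range_succ, List.foldl_append, ih (by omega), List.foldl_cons, List.foldl_nil]
    rw [pvWalkA_eq_sfx cs (cs.length) m _ (by omega) (by omega)]
    unfold pvClean pvKey
    rw [List.range_succ, List.foldl_append, List.foldl_cons, List.foldl_nil]

-- ===== VERDICT (by name: the statement is the Claim_ definition above) =====
theorem get_all_possible_decodings_spec : Claim_equal_get_all_possible_decodings := by
  intro enc _ _
  unfold Spec_get_all_possible_decodings get_all_possible_decodings get_all_possible_decodings_alt
  simp only []
  rw [pvAFold enc.toList enc.toList.length (le_refl _)]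
  rw [pvTable enc.toList]
  have hfold : (List.range enc.toList.length).foldl
      (fun (d : PySem.Dict String Int) i =>
        d.insert (String.ofList (PySem.Chars.join [',']
          ((List.range i).map (fun k => [enc.toList.getD k ' ']) ++
            ((List.range (enc.toList.length + 1)).map (fun k => pvSfx enc.toList k)).getD i []))) 1)
      PySem.Dict.empty = pvClean enc.toList enc.toList.length := by
    unfold pvClean
    apply PySem.List.foldl_congr_mem
    intro acc i hi
    rw [PySem.List.getD_map_range _ (enc.toList.length + 1) i [] (by have := List.mem_range.mp hi; omega)]
    rfl
  rw [hfold]
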